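-- pv_equiv track=rewrite | github.com/daveruckel/Python | balls.py | solution
-- ===== SOURCE A (Python) =====
-- def solution(balls):
--
-- 	moves = 0 # No of moves it will take (output)
-- 	num_balls = len(balls) # find number of balls
-- 	consec_balls = 0  # No of balls that are next to each other
-- 	nonconsec_balls = 0 # No of balls that are not next to each other
-- 	a = 0
-- 	b = 0
-- 	#diff = (b - a) + 2
--
-- 	balls.sort()
--
-- 	for a, b in zip(balls, balls[1:]):
-- 		diff = (b - a) - 1  # No of gaps between each ball...diff - 1
-- 		if diff == 0:
-- 			consec_balls += 1
-- 		else: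
-- 			nonconsec_balls += 1
--
-- 	return(consec_balls, nonconsec_balls)
-- ===== SOURCE B (Python) =====
-- def solution(balls):
--     balls.sort()  # keep A's in-place sort side effect
--     uniq = sorted(set(balls))
--     consec = sum(1 for a, b in zip(uniq, uniq[1:]) if b - a == 1)
--     return (consec, max(len(balls) - 1, 0) - consec)
-- ===== Notes on version B (the rewrite author's own statement) =====
-- stated objective: simpler
-- what changed: B counts consecutive pairs on the sorted distinct values (sorted(set(balls))) and derives the nonconsecutive count arithmetically as (len-1) - consec, instead of A's two-accumulator branch over every adjacent pair of the sorted list.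
import Mathlib
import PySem

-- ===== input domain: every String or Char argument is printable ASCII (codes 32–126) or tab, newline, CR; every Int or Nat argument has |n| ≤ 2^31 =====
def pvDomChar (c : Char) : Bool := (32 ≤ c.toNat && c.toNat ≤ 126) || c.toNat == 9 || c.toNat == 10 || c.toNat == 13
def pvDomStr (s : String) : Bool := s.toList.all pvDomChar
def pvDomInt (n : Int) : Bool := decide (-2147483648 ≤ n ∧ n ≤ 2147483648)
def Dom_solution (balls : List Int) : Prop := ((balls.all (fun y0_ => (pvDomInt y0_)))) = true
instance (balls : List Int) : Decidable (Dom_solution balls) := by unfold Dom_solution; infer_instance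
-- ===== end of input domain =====

-- B counts consecutive pairs on the sorted distinct values and derives the nonconsecutive
-- count arithmetically, instead of A's two-accumulator branch over every adjacent pair
-- (objective: simpler). Both Pythons sort `balls` in place; equivalence here is about the
-- return value (the mutation is identical anyway).

-- ===== PORT A =====
def solution (balls : List Int) : Int × Int :=
  -- balls.sort()
  let s := PySem.List.sorted balls (fun x => x) false
  -- for a, b in zip(balls, balls[1:]): diff = (b - a) - 1; if diff == 0: consec += 1 else nonconsec += 1
  let p := (s.zip (PySem.List.slice s (some 1) none)).foldl
    (fun (acc : Int × Int) ab =>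
      if ab.2 - ab.1 - 1 = 0 then (acc.1 + 1, acc.2) else (acc.1, acc.2 + 1))
    (0, 0)
  (p.1, p.2)

-- ===== PORT B =====
def solution_alt (balls : List Int) : Int × Int :=
  -- balls.sort() is a pure mutation in B; its value is unused below
  -- uniq = sorted(set(balls))
  let uniq := PySem.List.sorted (PySem.Set.ofList balls) (fun x => x) false
  -- consec = sum(1 for a, b in zip(uniq, uniq[1:]) if b - a == 1)
  let consec := ((uniq.zip (PySem.List.slice uniq (some 1) none)).map
      (fun ab => if ab.2 - ab.1 = 1 then (1 : Int) else 0)).sum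
  (consec, max ((balls.length : Int) - 1) 0 - consec)

-- ===== PRECONDITION & SPEC =====
def Spec_solution (balls : List Int) (out : Int × Int) : Prop := out = solution_alt balls
instance (balls : List Int) (out : Int × Int) : Decidable (Spec_solution balls out) := by unfold Spec_solution; infer_instance

-- ===== CLAIM (what is proved, stated in full; the proofs are below) =====
def Claim_equal_solution : Prop := ∀ (balls : List Int), Dom_solution balls → Spec_solution balls (solution balls)

-- ===== LEMMAS AND PROOFS =====

-- count of adjacent pairs at distance exactly 1
def c1 : List Int → Int
  | [] => 0
  | [_] => 0
  | a :: b :: t => (if b - a = 1 then 1 else 0) + c1 (b :: t)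

-- adjacent-duplicate removal
def dd : List Int → List Int
  | [] => []
  | [a] => [a]
  | a :: b :: t => if a = b then dd (b :: t) else a :: dd (b :: t)

theorem dd_cons (a : Int) (t : List Int) : ∃ t', dd (a :: t) = a :: t' := by
  induction t generalizing a with
  | nil => exact ⟨[], rfl⟩
  | cons b t ih =>
    by_cases h : a = b
    · obtain ⟨t', ht'⟩ := ih b
      exact ⟨t', by simp [dd, h, ← ht']⟩
    · exact ⟨dd (b :: t), by simp [dd, h]⟩

theorem mem_dd (x : Int) (s : List Int) : x ∈ dd s ↔ x ∈ s := by
  induction s with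
  | nil => simp [dd]
  | cons a t ih =>
    cases t with
    | nil => simp [dd]
    | cons b u =>
      by_cases h : a = b
      · simp only [dd, if_pos h] at *
        simp [ih, h]
      · simp only [dd, if_neg h] at *
        simp [ih]

theorem pairwise_dd (s : List Int) (hs : s.Pairwise (· ≤ ·)) : (dd s).Pairwise (· < ·) := by
  induction s with
  | nil => simp [dd]
  | cons a t ih =>
    cases t with
    | nil => simp [dd]
    | cons b u =>
      have hbt := ih (List.pairwise_cons.mp hs).2
      by_cases h : a = b
      · simpa [dd, h] using hbt
      · have hab : ∀ y ∈ b :: u, a ≤ y := (List.pairwise_cons.mp hs).1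
        simp only [dd, if_neg h]
        refine List.pairwise_cons.mpr ⟨?_, hbt⟩
        intro y hy
        have hyin : y ∈ b :: u := (mem_dd y (b :: u)).mp hy
        refine lt_of_le_of_ne (hab y hyin) ?_
        rintro rfl
        rcases List.mem_cons.mp hyin with rfl | hu
        · exact h rfl
        · have hba : b ≤ a :=
            (List.pairwise_cons.mp (List.pairwise_cons.mp hs).2).1 a hu
          exact h (le_antisymm (hab b (by simp)) hba)

theorem c1_dd (s : List Int) (hs : s.Pairwise (· ≤ ·)) : c1 (dd s) = c1 s := by
  induction s with
  | nil => rfl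
  | cons a t ih =>
    cases t with
    | nil => rfl
    | cons b u =>
      have ht := (List.pairwise_cons.mp hs).2
      have hab : a ≤ b := (List.pairwise_cons.mp hs).1 b (by simp)
      by_cases h : a = b
      · have hb1 : ¬ (b - a = 1) := by omega
        simp only [dd, if_pos h, c1, if_neg hb1, ih ht]
        ring
      · obtain ⟨t', ht'⟩ := dd_cons b u
        simp only [dd, if_neg h, ht', c1, ← ih ht]

-- A's fold computes (x + c1 s, y + (#pairs - c1 s))
theorem foldA (s : List Int) (x y : Int) :
    (s.zip s.tail).foldl
      (fun (acc : Int × Int) ab =>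
        if ab.2 - ab.1 - 1 = 0 then (acc.1 + 1, acc.2) else (acc.1, acc.2 + 1))
      (x, y)
    = (x + c1 s, y + ((s.zip s.tail).length - c1 s)) := by
  induction s generalizing x y with
  | nil => simp [c1]
  | cons a t ih =>
    cases t with
    | nil => simp [c1]
    | cons b u =>
      simp only [List.tail_cons] at ih
      simp only [List.tail_cons, List.zip_cons_cons, List.foldl_cons, List.length_cons, c1]
      by_cases h : b - a - 1 = 0
      · have h1 : b - a = 1 := by omega
        rw [if_pos h, ih]
        simp only [h1, Prod.mk.injEq]
        push_cast
        constructor <;> ring_nf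
      · have h1 : ¬ (b - a = 1) := by omega
        rw [if_neg h, ih]
        simp only [if_neg h1, Prod.mk.injEq]
        push_cast
        constructor <;> ring_nf

-- B's sum computes c1
theorem sumB (u : List Int) :
    ((u.zip u.tail).map (fun ab => if ab.2 - ab.1 = 1 then (1 : Int) else 0)).sum = c1 u := by
  induction u with
  | nil => rfl
  | cons a t ih =>
    cases t with
    | nil => rfl
    | cons b v =>
      simp only [List.tail_cons, List.zip_cons_cons, List.map_cons, List.sum_cons, c1] at *
      rw [ih]

-- ===== VERDICT (by name: the statement is the Claim_ definition above) =====
theorem solution_spec : Claim_equal_solution := by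
  unfold Claim_equal_solution
  intro balls _
  unfold Spec_solution solution solution_alt
  simp only [PySem.List.slice_from_one]
  have hsp : (PySem.List.sorted balls (fun x => x) false).Pairwise (· ≤ ·) := by
    simpa using PySem.List.sorted_pairwise (xs := balls) (key := fun x => x)
  have hus : PySem.List.sorted (PySem.Set.ofList balls) (fun x => x) false
      = dd (PySem.List.sorted balls (fun x => x) false) := by
    apply PySem.List.sorted_eq_of_perm_of_pairwise_lt
    · refine (List.perm_ext_iff_of_nodup ?_ ?_).mpr ?_
      · exact (pairwise_dd _ hsp).nodup
      · exact PySem.Set.nodup_ofList balls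
      · intro x
        rw [mem_dd, PySem.List.mem_sorted, PySem.Set.mem_ofList]
    · simpa using pairwise_dd _ hsp
  rw [hus, foldA, sumB, c1_dd _ hsp]
  have hlen : (PySem.List.sorted balls (fun x => x) false).length = balls.length :=
    PySem.List.length_sorted ..
  simp only [List.length_zip, List.length_tail, hlen, Prod.mk.injEq]
  constructor
  · ring
  · push_cast
    omega
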